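-- pv_equiv track=rewrite | github.com/Ofek18100/PyForEngeeners | past_solutions_temp/ex4_solultion_2022b.py | courses_per_student
-- ===== SOURCE A (Python) =====
-- def courses_per_student(tuples_lst):
--     courses_per_student_dict = {}
--     for tup in tuples_lst:
--         stud_name = tup[0].lower()
--         course = tup[1].lower()
--         if not (stud_name in courses_per_student_dict):
--             courses_per_student_dict[stud_name] = [course]
--         else:
--             courses_per_student_dict[stud_name].append(course)
--     return(courses_per_student_dict)
-- ===== SOURCE B (Python) =====
-- def courses_per_student(tuples_lst):
--     pairs = [(name.lower(), course.lower()) for name, course in tuples_lst]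
--     return {name: [c for n, c in pairs if n == name] for name, _ in pairs}
-- ===== Notes on version B (the rewrite author's own statement) =====
-- stated objective: alternative
-- what changed: A threads a mutable dict through one loop with a membership branch (insert-or-append); B precomputes the lowered pair list once and builds the result as a dict comprehension whose value for each name is a filter over that list, trading the stateful accumulator for two declarative comprehensions.
import Mathlib
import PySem

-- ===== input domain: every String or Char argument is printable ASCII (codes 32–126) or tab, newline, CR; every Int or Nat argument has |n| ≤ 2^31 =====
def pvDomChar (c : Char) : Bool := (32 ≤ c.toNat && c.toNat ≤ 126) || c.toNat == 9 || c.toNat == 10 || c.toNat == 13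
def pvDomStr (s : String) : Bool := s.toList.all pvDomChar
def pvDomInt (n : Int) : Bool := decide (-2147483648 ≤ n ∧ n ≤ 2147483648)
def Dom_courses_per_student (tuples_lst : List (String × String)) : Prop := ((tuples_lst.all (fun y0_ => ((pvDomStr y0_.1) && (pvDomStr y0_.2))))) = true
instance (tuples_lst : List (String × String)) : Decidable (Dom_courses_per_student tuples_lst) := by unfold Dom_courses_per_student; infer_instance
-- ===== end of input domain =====

-- B replaces A's stateful insert-or-append dict loop by a lowered pair list plus a
-- dict comprehension whose values are filters over that list (alternative decomposition).

-- ===== PORT A =====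
def courses_per_student (tuples_lst : List (String × String)) : List (String × List String) :=
  (tuples_lst.foldl (fun d tup =>
      let stud_name := PySem.Str.lower tup.1
      let course := PySem.Str.lower tup.2
      if !(d.contains stud_name) then d.insert stud_name [course]
      else d.modify stud_name [] (· ++ [course]))
    PySem.Dict.empty).items

-- ===== PORT B =====
def courses_per_student_alt (tuples_lst : List (String × String)) : List (String × List String) :=
  let pairs := tuples_lst.map (fun t => (PySem.Str.lower t.1, PySem.Str.lower t.2))
  (pairs.foldl (fun d p =>
      d.insert p.1 ((pairs.filter (fun q => q.1 == p.1)).map (fun q => q.2)))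
    PySem.Dict.empty).items

-- ===== PRECONDITION & SPEC =====
def Spec_courses_per_student (tuples_lst : List (String × String)) (out : List (String × List String)) : Prop := out = courses_per_student_alt tuples_lst
instance (tuples_lst : List (String × String)) (out : List (String × List String)) : Decidable (Spec_courses_per_student tuples_lst out) := by unfold Spec_courses_per_student; infer_instance

-- ===== CLAIM (what is proved, stated in full; the proofs are below) =====
def Claim_equal_courses_per_student : Prop := ∀ (tuples_lst : List (String × String)), Dom_courses_per_student tuples_lst → Spec_courses_per_student tuples_lst (courses_per_student tuples_lst)

-- ===== LEMMAS AND PROOFS =====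

-- A's loop step, expressed on already-lowered pairs.
def stepA (d : PySem.Dict String (List String)) (p : String × String) : PySem.Dict String (List String) :=
  if !(d.contains p.1) then d.insert p.1 [p.2] else d.modify p.1 [] (· ++ [p.2])

lemma keys_foldl_stepA (l : List (String × String)) (d : PySem.Dict String (List String)) :
    (l.foldl stepA d).keys = PySem.Set.update d.keys (l.map (fun p => p.1)) := by
  induction l generalizing d with
  | nil => simp [PySem.Set.update]
  | cons p t ih =>
    have hstep : (stepA d p).keys = PySem.Set.add d.keys p.1 := by
      unfold stepA
      by_cases h : d.contains p.1
      · have hm : p.1 ∈ d.keys := (PySem.Dict.contains_iff_mem_keys d p.1).1 h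
        simp [h, PySem.Dict.keys_modify, PySem.Dict.keys_insert_of_contains,
          PySem.Set.add_of_mem hm]
      · simp only [Bool.not_eq_true] at h
        rw [if_pos (by simp [h]), PySem.Dict.keys_insert_of_not_contains _ _ h,
          PySem.Set.add_of_not_mem]
        intro hm
        exact absurd ((PySem.Dict.contains_iff_mem_keys d p.1).2 hm) (by simp [h])
    simp only [List.foldl_cons, List.map_cons, PySem.Set.update_cons, ih, hstep]

lemma getD_foldl_stepA (l : List (String × String)) (d : PySem.Dict String (List String)) (k : String) :
    (l.foldl stepA d).getD k [] = d.getD k [] ++ (l.filter (fun p => p.1 == k)).map (fun p => p.2) := by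
  induction l generalizing d with
  | nil => simp
  | cons p t ih =>
    have hstep : (stepA d p).getD k [] =
        (if p.1 == k then d.getD k [] ++ [p.2] else d.getD k []) := by
      unfold stepA
      by_cases h : d.contains p.1
      · rw [if_neg (by simp [h]), PySem.Dict.getD_modify]
        by_cases hk : p.1 = k
        · simp [hk]
        · rw [if_neg (fun e => hk e.symm), if_neg (by simp [hk])]
      · simp only [Bool.not_eq_true] at h
        rw [if_pos (by simp [h]), PySem.Dict.getD_insert]
        by_cases hk : p.1 = k
        · subst hk
          simp [PySem.Dict.getD_of_not_contains _ _ h]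
        · rw [if_neg (fun e => hk e.symm), if_neg (by simp [hk])]
    simp only [List.foldl_cons, ih, hstep, List.filter_cons]
    by_cases hk : p.1 = k <;> simp [hk]

-- B's loop: insert with a value depending only on the key.
lemma getD_foldl_insertv (v : String → List String)
    (l : List (String × String)) (d : PySem.Dict String (List String)) (k : String) :
    (l.foldl (fun d p => d.insert p.1 (v p.1)) d).getD k [] =
      if k ∈ l.map (fun p => p.1) then v k else d.getD k [] := by
  induction l generalizing d with
  | nil => simp
  | cons p t ih =>
    simp only [List.foldl_cons, ih, List.map_cons, List.mem_cons]
    by_cases hm : k ∈ t.map (fun p => p.1)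
    · simp [hm]
    · rw [if_neg (by simp [hm]), PySem.Dict.getD_insert]
      by_cases hk : k = p.1 <;> simp [hk, hm]

theorem courses_per_student_spec : Claim_equal_courses_per_student := by
  intro l _
  unfold Spec_courses_per_student courses_per_student courses_per_student_alt
  set pairs := l.map (fun t => (PySem.Str.lower t.1, PySem.Str.lower t.2)) with hpairs
  set v : String → List String :=
    fun k => (pairs.filter (fun q => q.1 == k)).map (fun q => q.2) with hv
  -- A's fold over l equals stepA folded over the lowered pairs
  have hA : l.foldl (fun d tup =>
      let stud_name := PySem.Str.lower tup.1
      let course := PySem.Str.lower tup.2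
      if !(d.contains stud_name) then d.insert stud_name [course]
      else d.modify stud_name [] (· ++ [course])) PySem.Dict.empty
      = pairs.foldl stepA PySem.Dict.empty := by
    rw [hpairs, List.foldl_map]
    rfl
  rw [hA]
  set dA := pairs.foldl stepA PySem.Dict.empty with hdA
  set dB := pairs.foldl (fun d p => d.insert p.1 (v p.1)) PySem.Dict.empty with hdB
  have hkA : dA.keys = PySem.Set.ofList (pairs.map (fun p => p.1)) := by
    rw [hdA, keys_foldl_stepA]
    simp [PySem.Set.update_nil_left]
  have hkB : dB.keys = PySem.Set.ofList (pairs.map (fun p => p.1)) := by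
    rw [hdB, PySem.Dict.keys_foldl_insert_key]
    simp [PySem.Set.update_nil_left]
  have hndA : dA.keys.Nodup := by rw [hkA]; exact PySem.Set.nodup_ofList _
  have hndB : dB.keys.Nodup := by rw [hkB]; exact PySem.Set.nodup_ofList _
  rw [PySem.Dict.items_eq_map_keys dA hndA [], PySem.Dict.items_eq_map_keys dB hndB [],
    hkA, hkB]
  apply List.map_congr_left
  intro k hk
  have hmem : k ∈ pairs.map (fun p => p.1) := (PySem.Set.mem_ofList _ _).1 hk
  have hBv : dB.getD k [] = v k := by
    rw [hdB, getD_foldl_insertv, if_pos hmem]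
  have hAv : dA.getD k [] = v k := by
    rw [hdA, getD_foldl_stepA]
    simp [hv]
  rw [hAv, hBv]

-- ===== VERDICT (by name: the statement is the Claim_ definition above) =====
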